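-- pv_equiv track=rewrite | github.com/oh-tilia/Health-CODE | Python/pca_transcripts.py | _biplot_label_offsets
-- ===== SOURCE A (Python) =====
-- def _biplot_label_offsets(n: int) -> list[tuple[int, int]]:
--     """Cyclic pixel offsets so variable captions overlap less."""
--     base = [
--         (14, 10),
--         (-14, 10),
--         (14, -10),
--         (-14, -10),
--         (22, 0),
--         (-22, 0),
--         (0, 16),
--         (0, -16),
--         (18, 14),
--         (-18, -14),
--         (18, -14),
--         (-18, 14),
--     ]
--     return [base[i % len(base)] for i in range(n)]
-- ===== SOURCE B (Python) =====
-- def _biplot_label_offsets(n: int) -> list[tuple[int, int]]: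
--     """Cyclic pixel offsets so variable captions overlap less."""
--     base = [
--         (14, 10),
--         (-14, 10),
--         (14, -10),
--         (-14, -10),
--         (22, 0),
--         (-22, 0),
--         (0, 16),
--         (0, -16),
--         (18, 14),
--         (-18, -14),
--         (18, -14),
--         (-18, 14),
--     ]
--     out = []
--     remaining = n
--     while remaining > 12:
--         out += base
--         remaining -= 12
--     if remaining > 0:
--         out += base[:remaining]
--     return out
-- ===== Notes on version B (the rewrite author's own statement) =====
-- stated objective: alternative
-- what changed: B replaces the per-element modular-index comprehension over range(n) by a while loop that peels one whole period per iteration, appending the entire base list in bulk, and finishes with a single slice for the partial period; no per-element index arithmetic.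
import Mathlib
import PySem

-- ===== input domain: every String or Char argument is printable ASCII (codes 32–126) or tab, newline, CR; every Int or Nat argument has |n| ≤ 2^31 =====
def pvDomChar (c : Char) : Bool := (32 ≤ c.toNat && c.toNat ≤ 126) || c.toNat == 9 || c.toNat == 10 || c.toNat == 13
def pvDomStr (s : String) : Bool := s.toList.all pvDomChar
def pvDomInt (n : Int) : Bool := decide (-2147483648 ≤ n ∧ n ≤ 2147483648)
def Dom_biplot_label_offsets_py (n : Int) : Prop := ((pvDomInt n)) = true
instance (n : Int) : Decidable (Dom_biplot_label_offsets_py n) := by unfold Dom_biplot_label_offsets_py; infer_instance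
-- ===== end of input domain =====

-- B replaces the per-element modular-index comprehension by a while loop that appends the whole base
-- list per iteration and finishes with one slice for the partial period; an alternative decomposition of the same O(n) task.


-- ===== PORT A =====
def biplot_label_offsets_py (n : Int) : List (Int × Int) :=
  let base : List (Int × Int) := [((14:Int),(10:Int)), (-14, 10), (14, -10), (-14, -10), (22, 0), (-22, 0), (0, 16), (0, -16), (18, 14), (-18, -14), (18, -14), (-18, 14)]
  (PySem.List.pyRange 0 n 1).map (fun i => PySem.List.pyGetD base (PySem.Int.mod i (base.length : Int)) (0, 0))

-- ===== PORT B =====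
def pvBaseB : List (Int × Int) := [((14:Int),(10:Int)), (-14, 10), (14, -10), (-14, -10), (22, 0), (-22, 0), (0, 16), (0, -16), (18, 14), (-18, -14), (18, -14), (-18, 14)]

-- the while loop of Source B: state (out, remaining)
def pvAltLoop (out : List (Int × Int)) (remaining : Int) : List (Int × Int) :=
  if 12 < remaining then pvAltLoop (out ++ pvBaseB) (remaining - 12)
  else if 0 < remaining then out ++ PySem.List.slice pvBaseB none (some remaining)
  else out
termination_by remaining.toNat
decreasing_by omega

def biplot_label_offsets_py_alt (n : Int) : List (Int × Int) :=
  pvAltLoop [] n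

-- ===== PRECONDITION & SPEC =====
def Spec_biplot_label_offsets_py (n : Int) (out : List (Int × Int)) : Prop := out = biplot_label_offsets_py_alt n
instance (n : Int) (out : List (Int × Int)) : Decidable (Spec_biplot_label_offsets_py n out) := by unfold Spec_biplot_label_offsets_py; infer_instance

-- ===== CLAIM (what is proved, stated in full; the proofs are below) =====
def Claim_equal_biplot_label_offsets_py : Prop := ∀ (n : Int), Dom_biplot_label_offsets_py n → Spec_biplot_label_offsets_py n (biplot_label_offsets_py n)

-- ===== LEMMAS AND PROOFS =====

def pvF (k : Nat) : Int × Int := PySem.List.pyGetD pvBaseB (PySem.Int.mod (k : Int) 12) (0, 0)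

theorem pvF_shift (j : Nat) : pvF (12 + j) = pvF j := by
  unfold pvF
  have h : PySem.Int.mod ((12 + j : Nat) : Int) 12 = PySem.Int.mod (j : Int) 12 := by
    rw [PySem.Int.mod_eq_emod_of_pos (by omega), PySem.Int.mod_eq_emod_of_pos (by omega)]
    push_cast
    omega
  rw [h]

theorem pvBaseB_eq_map : pvBaseB = (List.range 12).map pvF := by decide

theorem pv_peel' (k : Nat) :
    pvBaseB ++ (List.range k).map pvF = (List.range (12 + k)).map pvF := by
  rw [List.range_add, List.map_append, List.map_map, pvBaseB_eq_map]
  congr 1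
  apply List.map_congr_left
  intro j _
  exact (pvF_shift j).symm

theorem pv_peel (m : Nat) (h : 12 ≤ m) :
    pvBaseB ++ (List.range (m - 12)).map pvF = (List.range m).map pvF := by
  rw [pv_peel' (m - 12), show 12 + (m - 12) = m from by omega]

theorem pv_take (r : Int) (h0 : 0 < r) (h12 : r ≤ 12) :
    PySem.List.slice pvBaseB none (some r) = (List.range r.toNat).map pvF := by
  rw [PySem.List.slice_to _ (le_of_lt h0), pvBaseB_eq_map, ← List.map_take, List.take_range,
    show min r.toNat 12 = r.toNat from by omega]

theorem pvAltLoop_eq (out : List (Int × Int)) (r : Int) :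
    pvAltLoop out r = out ++ (List.range r.toNat).map pvF := by
  induction out, r using pvAltLoop.induct with
  | case1 out r h ih =>
    rw [pvAltLoop, if_pos h, ih, List.append_assoc]
    congr 1
    have ht : (r - 12).toNat = r.toNat - 12 := by omega
    rw [ht, pv_peel r.toNat (by omega)]
  | case2 out r h h0 =>
    rw [pvAltLoop, if_neg h, if_pos h0, pv_take r h0 (by omega)]
  | case3 out r h h0 =>
    rw [pvAltLoop, if_neg h, if_neg h0]
    have : r.toNat = 0 := by omega
    simp [this]

theorem pv_A (n : Int) :
    biplot_label_offsets_py n = (List.range n.toNat).map pvF := by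
  show (PySem.List.pyRange 0 n 1).map
        (fun i => PySem.List.pyGetD pvBaseB (PySem.Int.mod i 12) (0, 0))
      = (List.range n.toNat).map pvF
  rw [PySem.List.pyRange_one, List.map_map]
  simp only [sub_zero]
  apply List.map_congr_left
  intro k _
  simp [pvF]

-- ===== VERDICT (by name: the statement is the Claim_ definition above) =====
theorem biplot_label_offsets_py_spec : Claim_equal_biplot_label_offsets_py := by
  intro n _
  unfold Spec_biplot_label_offsets_py biplot_label_offsets_py_alt
  rw [pv_A, pvAltLoop_eq, List.nil_append]
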